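-- pv_equiv track=rewrite | github.com/Sky-zzt/lintcodePractice | pythonAlgorithm/bigcompany/Prime Factor Statistics.py | Count_PrimeNum
-- ===== SOURCE A (Python) =====
-- def Count_PrimeNum(N):
--     ans = 0
--     vis = [False] * 100005
--     prime = [1] * 100005
--     for i in range(2, N + 1):
--         ans += prime[i]
--         k = int(min(N / i, i))
--         for j in range(2, k + 1):
--             if vis[i * j]:
--                 continue
--             vis[i * j] = True
--             prime[i * j] = prime[i] + prime[j]
--     return ans
-- ===== SOURCE B (Python) =====
-- def omega_count(n):
--     # number of prime factors of n with multiplicity, by trial division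
--     c = 0
--     d = 2
--     while d * d <= n:
--         while n % d == 0:
--             n //= d
--             c += 1
--         d += 1
--     if n > 1:
--         c += 1
--     return c
--
--
-- def Count_PrimeNum(N):
--     total = 0
--     for n in range(2, N + 1):
--         total += omega_count(n)
--     return total
-- ===== Notes on version B (the rewrite author's own statement) =====
-- stated objective: simpler
-- what changed: Replaced the cross-marking sieve over two fixed 100005-element arrays by direct trial-division counting of prime factors (with multiplicity) of each number 2..N, summed in one pass.
-- outside the precondition, e.g. on Count_PrimeNum(100005): A raises IndexError, B returns 343629
import Mathlib
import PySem

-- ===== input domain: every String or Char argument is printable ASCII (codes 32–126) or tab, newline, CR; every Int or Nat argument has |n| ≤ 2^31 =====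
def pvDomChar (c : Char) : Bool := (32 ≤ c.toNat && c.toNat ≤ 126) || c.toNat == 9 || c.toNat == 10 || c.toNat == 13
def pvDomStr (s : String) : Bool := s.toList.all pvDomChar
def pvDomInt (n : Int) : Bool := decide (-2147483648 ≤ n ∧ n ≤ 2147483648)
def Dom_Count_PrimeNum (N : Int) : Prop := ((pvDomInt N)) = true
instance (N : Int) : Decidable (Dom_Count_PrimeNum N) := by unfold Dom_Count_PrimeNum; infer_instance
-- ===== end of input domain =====

-- B replaces A's cross-marking sieve over two fixed 100005-entry arrays by direct
-- trial-division counting of prime factors (with multiplicity) per number: simpler, no big arrays.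


-- ===== PORT A =====
-- Transliteration of A.  Exactness notes (all under Pre_, i.e. N ≤ 100004):
-- * `int(min(N / i, i))` is ported as `min (N // i) i`: in the loop 2 ≤ i ≤ N ≤ 100004, so
--   N / i > 0 and the float rounding (relative error 2⁻⁵³) cannot move N / i across an
--   integer (a rational N/i that is not an integer is at distance ≥ 1/i ≥ 10⁻⁵ from one),
--   hence int(min(N/i, i)) = min(floor(N/i), i) exactly there.
-- * the Python lists are ported as Arrays (same algorithm, O(1) update) with total
--   getD/setIfInBounds access; every index reached is in [2, 100004]
--   under Pre_ (for N ≥ 100005 the Python raises IndexError, which Pre_ excludes).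
def Count_PrimeNum (N : Int) : Int :=
  ((PySem.List.pyRange 2 (N + 1) 1).foldl
    (fun (st : Int × Array Bool × Array Int) i =>
      let ans := st.1 + st.2.2.getD i.toNat 1
      let k := min (PySem.Int.floordiv N i) i
      let inner := (PySem.List.pyRange 2 (k + 1) 1).foldl
        (fun (st2 : Array Bool × Array Int) j =>
          if st2.1.getD (i * j).toNat false = true then st2
          else (st2.1.setIfInBounds (i * j).toNat true,
                st2.2.setIfInBounds (i * j).toNat
                  (st2.2.getD i.toNat 1 + st2.2.getD j.toNat 1)))
        st.2
      (ans, inner))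
    (0, Array.replicate 100005 false, Array.replicate 100005 (1 : Int))).1

-- ===== PORT B =====
-- inner `while n % d == 0: n //= d; c += 1` of omega_count.  The fuel argument only makes
-- the recursion total; fuel n.toNat is enough for every call the program reaches.
def divOut (fuel : Nat) (n d c : Int) : Int × Int :=
  match fuel with
  | 0 => (n, c)
  | fuel + 1 =>
    if PySem.Int.mod n d = 0 then divOut fuel (PySem.Int.floordiv n d) d (c + 1)
    else (n, c)

-- outer `while d * d <= n` of omega_count (fuel again only for totality)
def omegaLoop (fuel : Nat) (d n c : Int) : Int :=
  match fuel with
  | 0 => c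
  | fuel + 1 =>
    if d * d ≤ n then
      omegaLoop fuel (d + 1) (divOut n.toNat n d c).1 (divOut n.toNat n d c).2
    else if 1 < n then c + 1 else c

def omegaCount (n : Int) : Int := omegaLoop (n.toNat + 1) 2 n 0

def Count_PrimeNum_alt (N : Int) : Int :=
  (PySem.List.pyRange 2 (N + 1) 1).foldl (fun total n => total + omegaCount n) 0

-- ===== PRECONDITION & SPEC =====
-- A indexes two fixed arrays of length 100005; for N ≥ 100005 the Python A raises IndexError.
def Pre_Count_PrimeNum (N : Int) : Prop := N ≤ 100004
instance (N : Int) : Decidable (Pre_Count_PrimeNum N) := by unfold Pre_Count_PrimeNum; infer_instance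
def pvWitness_Count_PrimeNum : Int := 30

def Spec_Count_PrimeNum (N : Int) (out : Int) : Prop := out = Count_PrimeNum_alt N
instance (N : Int) (out : Int) : Decidable (Spec_Count_PrimeNum N out) := by unfold Spec_Count_PrimeNum; infer_instance

-- ===== CLAIM (what is proved, stated in full; the proofs are below) =====
def Claim_equal_Count_PrimeNum : Prop := ∀ (N : Int), Dom_Count_PrimeNum N → Pre_Count_PrimeNum N → Spec_Count_PrimeNum N (Count_PrimeNum N)

-- ===== LEMMAS AND PROOFS =====

-- Ω(n): number of prime factors with multiplicity
def Om (n : ℕ) : ℤ := (n.primeFactorsList.length : ℤ)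

theorem Om_one : Om 1 = 0 := by simp [Om]

theorem Om_prime {p : ℕ} (hp : p.Prime) : Om p = 1 := by
  simp [Om, Nat.primeFactorsList_prime hp]

theorem Om_mul {a b : ℕ} (ha : a ≠ 0) (hb : b ≠ 0) : Om (a * b) = Om a + Om b := by
  have h := (Nat.perm_primeFactorsList_mul ha hb).length_eq
  simp [Om, h]

-- the common value of the two programs: ∑_{m=2}^{i0} Ω(m)
def S (i0 : ℤ) : ℤ := ∑ m ∈ Finset.Icc 2 i0.toNat, Om m

theorem S_nonpos {i0 : ℤ} (h : i0 ≤ 1) : S i0 = 0 := by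
  have he : Finset.Icc 2 i0.toNat = ∅ := by apply Finset.Icc_eq_empty; omega
  simp [S, he]

theorem S_succ {x : ℤ} (hx : 2 ≤ x) : S x = S (x - 1) + Om x.toNat := by
  have h1 : x.toNat = (x - 1).toNat + 1 := by omega
  have h2 : 2 ≤ (x - 1).toNat + 1 := by omega
  rw [S, S, h1, Finset.sum_Icc_succ_top h2]

-- ---------- B side: omega_count n = Ω(n) ----------
theorem divOut_spec {p : ℕ} (hp : p.Prime) :
    ∀ (fuel m : ℕ), 0 < m → m ≤ fuel → ∀ (c : ℤ),
      ∃ m' : ℕ, divOut fuel (m : ℤ) (p : ℤ) c = ((m' : ℤ), c + Om m - Om m') ∧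
        0 < m' ∧ ¬ (p ∣ m') ∧ ∀ q : ℕ, q ∣ m' → q ∣ m := by
  intro fuel
  induction fuel with
  | zero => intro m hm hf c; omega
  | succ fuel ih =>
    intro m hm hf c
    by_cases hdvd : p ∣ m
    · have hcond : PySem.Int.mod (m : ℤ) (p : ℤ) = 0 := by
        rw [PySem.Int.mod_natCast]
        exact_mod_cast (Nat.dvd_iff_mod_eq_zero.mp hdvd)
      rw [divOut, if_pos hcond, PySem.Int.floordiv_natCast]
      have hlt : m / p < m := Nat.div_lt_self hm hp.one_lt
      have hpos : 0 < m / p := Nat.div_pos (Nat.le_of_dvd hm hdvd) hp.pos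
      obtain ⟨m', heq, h1, h2, h3⟩ := ih (m / p) hpos (by omega) (c + 1)
      refine ⟨m', ?_, h1, h2, fun q hq => (h3 q hq).trans (Nat.div_dvd_of_dvd hdvd)⟩
      rw [heq]
      have hOm : Om m = Om (m / p) + 1 := by
        have hm' : m = p * (m / p) := (Nat.mul_div_cancel' hdvd).symm
        calc Om m = Om (p * (m / p)) := by rw [← hm']
          _ = Om p + Om (m / p) := Om_mul hp.pos.ne' hpos.ne'
          _ = Om (m / p) + 1 := by rw [Om_prime hp]; ring
      refine Prod.ext rfl ?_
      simp only
      omega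
    · have hcond : ¬ PySem.Int.mod (m : ℤ) (p : ℤ) = 0 := by
        intro hmod
        rw [PySem.Int.mod_natCast] at hmod
        exact hdvd (Nat.dvd_iff_mod_eq_zero.mpr (by exact_mod_cast hmod))
      rw [divOut, if_neg hcond]
      exact ⟨m, by refine Prod.ext rfl ?_; simp only; ring, hm, hdvd, fun q hq => hq⟩

theorem omegaLoop_spec :
    ∀ (fuel : ℕ) (m d : ℕ) (c : ℤ), m + 2 - d ≤ fuel → 0 < m → 2 ≤ d →
      (∀ p : ℕ, p.Prime → p ∣ m → d ≤ p) →
      omegaLoop fuel (d : ℤ) (m : ℤ) c = c + Om m := by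
  intro fuel
  induction fuel with
  | zero =>
    intro m d c hK hm hd hfac
    have hm1 : m = 1 := by
      by_contra hne
      have hp := Nat.minFac_prime (by omega : m ≠ 1)
      have h1 := hfac m.minFac hp (Nat.minFac_dvd m)
      have h2 := Nat.minFac_le (by omega : 0 < m)
      omega
    subst hm1
    rw [omegaLoop, Om_one]
    ring
  | succ fuel ihK =>
    intro m d c hK hm hd hfac
    by_cases hg : d * d ≤ m
    · have hgz : (d : ℤ) * (d : ℤ) ≤ (m : ℤ) := by exact_mod_cast hg
      rw [omegaLoop, if_pos hgz]
      have hdm : d ≤ m := le_trans (Nat.le_mul_of_pos_left d (by omega)) hg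
      have htn : ((m : ℤ)).toNat = m := Int.toNat_natCast m
      by_cases hdvd : d ∣ m
      · -- d divides m, so d is prime (all smaller primes have been divided out)
        have hdprime : d.Prime := by
          have hq := Nat.minFac_prime (by omega : d ≠ 1)
          have h1 : d ≤ d.minFac := hfac d.minFac hq ((Nat.minFac_dvd d).trans hdvd)
          have h2 : d.minFac ≤ d := Nat.minFac_le (by omega)
          have : d.minFac = d := by omega
          rwa [← this]
        obtain ⟨m', heq, hm'pos, hnd, hqd⟩ := divOut_spec hdprime m m hm le_rfl c
        rw [htn, heq]
        have hm'le : m' ≤ m := Nat.le_of_dvd hm (hqd m' dvd_rfl)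
        have hcast : ((d : ℤ) + 1) = ((d + 1 : ℕ) : ℤ) := by push_cast; ring
        rw [hcast, ihK m' (d + 1) (c + Om m - Om m') (by omega) hm'pos (by omega)
          (fun p hp hpd => by
            have h1 : d ≤ p := hfac p hp (hqd p hpd)
            have h2 : p ≠ d := fun he => hnd (he ▸ hpd)
            omega)]
        ring
      · -- d does not divide m: divOut is the identity here
        have hcond : ¬ PySem.Int.mod (m : ℤ) (d : ℤ) = 0 := by
          intro hmod
          rw [PySem.Int.mod_natCast] at hmod
          exact hdvd (Nat.dvd_iff_mod_eq_zero.mpr (by exact_mod_cast hmod))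
        have hdo : divOut m (m : ℤ) (d : ℤ) c = ((m : ℤ), c) := by
          cases m with
          | zero => omega
          | succ m0 => rw [divOut, if_neg hcond]
        rw [htn, hdo]
        have hcast : ((d : ℤ) + 1) = ((d + 1 : ℕ) : ℤ) := by push_cast; ring
        rw [hcast]
        exact ihK m (d + 1) c (by omega) hm (by omega)
          (fun p hp hpd => by
            have h1 : d ≤ p := hfac p hp hpd
            have h2 : p ≠ d := fun he => hdvd (he ▸ hpd)
            omega)
    · have hgz : ¬ ((d : ℤ) * (d : ℤ) ≤ (m : ℤ)) := by exact_mod_cast hg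
      rw [omegaLoop, if_neg hgz]
      by_cases hm1 : 1 < m
      · -- m has no factor below d and d*d > m, so m is prime
        have hp := Nat.minFac_prime (by omega : m ≠ 1)
        have hdp : d ≤ m.minFac := hfac m.minFac hp (Nat.minFac_dvd m)
        have hmprime : m.Prime := by
          set p := m.minFac with hpdef
          have hpd : p ∣ m := Nat.minFac_dvd m
          have hr : m = p * (m / p) := (Nat.mul_div_cancel' hpd).symm
          have hrpos : 0 < m / p := Nat.div_pos (Nat.le_of_dvd (by omega) hpd) hp.pos
          by_cases hr1 : m / p = 1
          · rw [hr, hr1, Nat.mul_one]; exact hp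
          · exfalso
            have hq := Nat.minFac_prime (by omega : m / p ≠ 1)
            have hdq : d ≤ (m / p).minFac := hfac (m / p).minFac hq
              ((Nat.minFac_dvd (m / p)).trans (Nat.div_dvd_of_dvd hpd))
            have hqr : (m / p).minFac ≤ m / p := Nat.minFac_le hrpos
            have : d * d ≤ p * (m / p) :=
              Nat.mul_le_mul hdp (le_trans hdq hqr)
            omega
        have hml : (1 : ℤ) < (m : ℤ) := by exact_mod_cast hm1
        rw [if_pos hml, Om_prime hmprime]
      · have hm1' : m = 1 := by omega
        subst hm1'
        norm_num [Om_one]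

theorem omegaCount_eq (m : ℕ) (hm : 0 < m) : omegaCount (m : ℤ) = Om m := by
  have h := omegaLoop_spec (((m : ℤ)).toNat + 1) m 2 0 (by omega) hm (by omega)
    (fun p hp _ => hp.two_le)
  have hc : ((2 : ℕ) : ℤ) = (2 : ℤ) := by norm_num
  rw [omegaCount, ← hc, h]
  ring

theorem altFold : ∀ (n : ℕ),
    (PySem.List.pyRange 2 ((n : ℤ) + 1) 1).foldl (fun total x => total + omegaCount x) 0
      = S (n : ℤ) := by
  intro n
  induction n with
  | zero =>
    rw [PySem.List.pyRange_one_eq_nil (by norm_num)]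
    simp [S_nonpos]
  | succ n ih =>
    by_cases hn : n = 0
    · subst hn
      rw [PySem.List.pyRange_one_eq_nil (by norm_num)]
      simp [S_nonpos]
    · have hb : (2 : ℤ) ≤ ((n + 1 : ℕ) : ℤ) := by exact_mod_cast (by omega : 2 ≤ n + 1)
      have hsplit := PySem.List.pyRange_one_succ_right hb
      push_cast at hsplit ⊢
      rw [hsplit, List.foldl_append]
      simp only [List.foldl_cons, List.foldl_nil]
      rw [ih]
      have ho : omegaCount ((n : ℤ) + 1) = Om (n + 1) := by
        have := omegaCount_eq (n + 1) (by omega)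
        push_cast at this
        exact this
      rw [ho]
      have hS := S_succ (x := (n : ℤ) + 1) (by omega)
      have h1 : ((n : ℤ) + 1 - 1) = (n : ℤ) := by ring
      have h2 : ((n : ℤ) + 1).toNat = n + 1 := by omega
      rw [h1, h2] at hS
      omega

theorem alt_eq_S (N : Int) : Count_PrimeNum_alt N = S N := by
  by_cases hN : N ≤ 1
  · rw [Count_PrimeNum_alt, PySem.List.pyRange_one_eq_nil (by omega)]
    simp [S_nonpos hN]
  · have h2 : 2 ≤ N := by omega
    have hc : ((N.toNat : ℤ)) = N := by omega
    rw [Count_PrimeNum_alt, ← hc]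
    exact altFold N.toNat

-- ---------- A side: the sieve invariant ----------
-- m has been marked by the end of iteration i0: m = d*j with 2 ≤ j ≤ d ≤ i0 and m ≤ N
def Covered (N i0 m : ℤ) : Prop := ∃ d j : ℤ, m = d * j ∧ 2 ≤ j ∧ j ≤ d ∧ d ≤ i0 ∧ m ≤ N

-- state of (vis, prime) characterized by an abstract "marked" predicate C
def InvC (C : ℤ → Prop) (vis : Array Bool) (prime : Array ℤ) : Prop :=
  vis.size = 100005 ∧ prime.size = 100005 ∧
  (∀ m : ℤ, 0 ≤ m → m < 100005 → (vis.getD m.toNat false = true ↔ C m)) ∧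
  (∀ m : ℤ, 0 ≤ m → m < 100005 →
    (C m → prime.getD m.toNat 1 = Om m.toNat) ∧
    (¬ C m → prime.getD m.toNat 1 = 1))

-- marked during iteration i of the inner loop, after inner counter values < jmax
def CoveredIn (N i jmax m : ℤ) : Prop :=
  Covered N (i - 1) m ∨ ∃ j : ℤ, m = i * j ∧ 2 ≤ j ∧ j < jmax

theorem InvC_congr {C C' : ℤ → Prop} {vis prime} (h : InvC C vis prime)
    (hcc : ∀ m : ℤ, 0 ≤ m → m < 100005 → (C m ↔ C' m)) : InvC C' vis prime := by
  obtain ⟨h1, h2, h3, h4⟩ := h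
  refine ⟨h1, h2, fun m hm0 hm1 => (h3 m hm0 hm1).trans (hcc m hm0 hm1), fun m hm0 hm1 => ?_⟩
  obtain ⟨ha, hb⟩ := h4 m hm0 hm1
  exact ⟨fun hc => ha ((hcc m hm0 hm1).mpr hc), fun hc => hb (fun hx => hc ((hcc m hm0 hm1).mp hx))⟩

theorem Covered_mono {N i0 i1 m : ℤ} (h : Covered N i0 m) (hle : i0 ≤ i1) : Covered N i1 m := by
  obtain ⟨d, j, h1, h2, h3, h4, h5⟩ := h
  exact ⟨d, j, h1, h2, h3, by omega, h5⟩

theorem not_Covered_prime {N i0 m : ℤ} (hm : m.toNat.Prime) : ¬ Covered N i0 m := by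
  rintro ⟨d, j, h1, h2, h3, h4, h5⟩
  have hd2 : 2 ≤ d := by omega
  have hm0 : 0 ≤ m := by nlinarith
  have hnat : m.toNat = d.toNat * j.toNat := by
    have hd' : ((d.toNat : ℤ)) = d := by omega
    have hj' : ((j.toNat : ℤ)) = j := by omega
    have hDJ : m = ((d.toNat * j.toNat : ℕ) : ℤ) := by push_cast; rw [hd', hj']; exact h1
    omega
  have hdvd : d.toNat ∣ m.toNat := ⟨j.toNat, hnat⟩
  rcases (hm.eq_one_or_self_of_dvd d.toNat hdvd) with h | h
  · omega
  · have hj1 : j.toNat = 1 := by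
      have hmp : 0 < m.toNat := hm.pos
      nlinarith [hnat, h]
    omega

theorem Covered_of_composite {N i0 m : ℤ} (h2 : 2 ≤ m) (hN : m ≤ N) (hi : m - 1 ≤ i0)
    (hc : ¬ m.toNat.Prime) : Covered N i0 m := by
  set n := m.toNat with hn
  have hn2 : 2 ≤ n := by omega
  have hp := Nat.minFac_prime (by omega : n ≠ 1)
  have hpd : n.minFac ∣ n := Nat.minFac_dvd n
  set p := n.minFac with hpdef
  set q := n / p with hqdef
  have hq : p * q = n := Nat.mul_div_cancel' hpd
  have hqpos : 0 < q := Nat.div_pos (Nat.le_of_dvd (by omega) hpd) hp.pos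
  have hq1 : q ≠ 1 := by
    intro h1
    rw [h1, Nat.mul_one] at hq
    exact hc (hq ▸ hp)
  have hsq : p * p ≤ n := by
    have := Nat.minFac_sq_le_self (by omega : 0 < n) hc
    nlinarith [this]
  have hpq : p ≤ q := by nlinarith
  have hqlt : q < n := by nlinarith [hp.two_le]
  refine ⟨(q : ℤ), (p : ℤ), ?_, by exact_mod_cast hp.two_le, by exact_mod_cast hpq, by omega, hN⟩
  calc m = ((n : ℕ) : ℤ) := by omega
    _ = ((q * p : ℕ) : ℤ) := by rw [Nat.mul_comm, hq]
    _ = (q : ℤ) * (p : ℤ) := by push_cast; ring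

-- an unmarked entry is 1; together with Om on primes this gives prime[y] = Ω(y)
theorem entry_eq_Om {C : ℤ → Prop} {vis prime : _} (h : InvC C vis prime) {N i0 y : ℤ}
    (hC : C y ↔ Covered N i0 y) (h2 : 2 ≤ y) (hN : y ≤ N) (hi : y - 1 ≤ i0)
    (hlt : y < 100005) : prime.getD y.toNat 1 = Om y.toNat := by
  obtain ⟨-, -, -, h4⟩ := h
  obtain ⟨ha, hb⟩ := h4 y (by omega) hlt
  by_cases hp : y.toNat.Prime
  · rw [hb (fun hc => not_Covered_prime hp (hC.mp hc)), Om_prime hp]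
  · exact ha (hC.mpr (Covered_of_composite h2 hN hi hp))

theorem getD_setIfInBounds {α : Type} (xs : Array α) (a b : ℕ) (v d : α)
    (hb : b < xs.size) :
    (xs.setIfInBounds a v).getD b d = if b = a then v else xs.getD b d := by
  rw [Array.getD_eq_getD_getElem?, Array.getD_eq_getD_getElem?,
      Array.getElem?_eq_getElem (by simpa using hb), Array.getElem?_eq_getElem hb]
  rw [Array.getElem_setIfInBounds (by simpa using hb)]
  by_cases h : b = a
  · rw [if_pos h, if_pos (by omega)]
    rfl
  · rw [if_neg h, if_neg (by omega)]

theorem getD_replicate {α : Type} (n : ℕ) (v d : α) (m : ℕ) (hm : m < n) :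
    (Array.replicate n v).getD m d = v := by
  rw [Array.getD_eq_getD_getElem?,
      Array.getElem?_eq_getElem (by simpa using hm)]
  rw [Array.getElem_replicate]
  rfl

-- loop-invariant rule for a foldl over range(a, b)
theorem foldl_pyRange_inv {σ : Type} (f : σ → ℤ → σ) (P : ℤ → σ → Prop) (b : ℤ) :
    ∀ (k : ℕ) (a : ℤ) (st : σ), (b - a).toNat = k → a ≤ b → P a st →
      (∀ x st', a ≤ x → x < b → P x st' → P (x + 1) (f st' x)) →
      P b ((PySem.List.pyRange a b 1).foldl f st)
  | 0, a, st, hk, hab, hP, _ => by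
      have hba : a = b := by omega
      rw [PySem.List.pyRange_one_eq_nil (by omega)]
      simpa [hba] using hP
  | (k + 1), a, st, hk, _, hP, hstep => by
      have hab' : a < b := by omega
      rw [PySem.List.pyRange_one_cons hab']
      simp only [List.foldl_cons]
      exact foldl_pyRange_inv f P b k (a + 1) (f st a) (by omega) (by omega)
        (hstep a st le_rfl hab' hP)
        (fun x st' hx1 hx2 hPx => hstep x st' (by omega) hx2 hPx)

theorem coveredIn_two {N i m : ℤ} : CoveredIn N i 2 m ↔ Covered N (i - 1) m := by
  constructor
  · rintro (h | ⟨j, -, hj1, hj2⟩)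
    · exact h
    · omega
  · exact Or.inl

theorem coveredIn_succ {N i j m : ℤ} (hj : 2 ≤ j) :
    CoveredIn N i (j + 1) m ↔ CoveredIn N i j m ∨ m = i * j := by
  constructor
  · rintro (h | ⟨j', h1, h2, h3⟩)
    · exact Or.inl (Or.inl h)
    · by_cases hlt : j' < j
      · exact Or.inl (Or.inr ⟨j', h1, h2, hlt⟩)
      · have : j' = j := by omega
        exact Or.inr (this ▸ h1)
  · rintro ((h | ⟨j', h1, h2, h3⟩) | h)
    · exact Or.inl h
    · exact Or.inr ⟨j', h1, h2, by omega⟩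
    · exact Or.inr ⟨j, h, hj, by omega⟩

theorem coveredIn_lt {N i jm y : ℤ} (hy : y ≤ i) (hi : 2 ≤ i) :
    CoveredIn N i jm y ↔ Covered N (i - 1) y := by
  constructor
  · rintro (h | ⟨j', h1, h2, -⟩)
    · exact h
    · exfalso
      have : i * 2 ≤ i * j' := by nlinarith
      omega
  · exact Or.inl

theorem coveredIn_top {N x m : ℤ} (hx2 : 2 ≤ x) (hxN : x ≤ N) :
    CoveredIn N x (min (PySem.Int.floordiv N x) x + 1) m ↔ Covered N x m := by
  constructor
  · rintro (h | ⟨j, h1, h2, h3⟩)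
    · exact Covered_mono h (by omega)
    · have hjf : j ≤ PySem.Int.floordiv N x := by omega
      have hjx : j ≤ x := by omega
      have hmN : j * x ≤ N := (PySem.Int.le_floordiv_iff_mul_le (by omega)).mp hjf
      have hcomm : x * j = j * x := mul_comm x j
      exact ⟨x, j, h1, h2, hjx, le_refl x, by omega⟩
  · rintro ⟨d, j, h1, h2, h3, h4, h5⟩
    by_cases hd : d ≤ x - 1
    · exact Or.inl ⟨d, j, h1, h2, h3, hd, h5⟩
    · have hdx : d = x := by omega
      subst hdx
      refine Or.inr ⟨j, h1, h2, ?_⟩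
      have hjf : j ≤ PySem.Int.floordiv N d := by
        rw [PySem.Int.le_floordiv_iff_mul_le (by omega)]
        have hcomm : d * j = j * d := mul_comm d j
        omega
      omega

theorem inner_step {N x j : ℤ} (hx2 : 2 ≤ x) (hxN : x ≤ N) (hN : N ≤ 100004)
    (hj2 : 2 ≤ j) (hjf : j ≤ PySem.Int.floordiv N x) (hjx : j ≤ x)
    (vp : Array Bool × Array ℤ) (h : InvC (CoveredIn N x j) vp.1 vp.2) :
    InvC (CoveredIn N x (j + 1))
      (if vp.1.getD (x * j).toNat false = true then vp
       else (vp.1.setIfInBounds (x * j).toNat true,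
             vp.2.setIfInBounds (x * j).toNat
               (vp.2.getD x.toNat 1 + vp.2.getD j.toNat 1))).1
      (if vp.1.getD (x * j).toNat false = true then vp
       else (vp.1.setIfInBounds (x * j).toNat true,
             vp.2.setIfInBounds (x * j).toNat
               (vp.2.getD x.toNat 1 + vp.2.getD j.toNat 1))).2 := by
  have hmN : x * j ≤ N := by
    have h1 := (PySem.Int.le_floordiv_iff_mul_le (a := N) (b := x) (q := j) (by omega)).mp hjf
    have hcomm : x * j = j * x := mul_comm x j
    omega
  have hm0 : 0 ≤ x * j := by positivity
  have hmlt : x * j < 100005 := by omega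
  obtain ⟨hlv, hlp, hvis, hpr⟩ := h
  by_cases hc : vp.1.getD (x * j).toNat false = true
  · rw [if_pos hc]
    refine InvC_congr ⟨hlv, hlp, hvis, hpr⟩ (fun m hm0' hm1' => ?_)
    rw [coveredIn_succ hj2]
    constructor
    · exact Or.inl
    · rintro (hh | hh)
      · exact hh
      · exact hh ▸ ((hvis (x * j) hm0 hmlt).mp hc)
  · rw [if_neg hc]
    have hnc : ¬ CoveredIn N x j (x * j) := fun hcc => hc ((hvis (x * j) hm0 hmlt).mpr hcc)
    have hpx : vp.2.getD x.toNat 1 = Om x.toNat :=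
      entry_eq_Om ⟨hlv, hlp, hvis, hpr⟩ (coveredIn_lt le_rfl hx2) hx2 hxN (by omega) (by omega)
    have hpj : vp.2.getD j.toNat 1 = Om j.toNat :=
      entry_eq_Om ⟨hlv, hlp, hvis, hpr⟩ (coveredIn_lt hjx hx2) hj2 (by omega) (by omega) (by omega)
    have hOm : Om x.toNat + Om j.toNat = Om ((x * j).toNat) := by
      have e1 : ((x.toNat : ℤ)) = x := by omega
      have e2 : ((j.toNat : ℤ)) = j := by omega
      have e3 : ((x.toNat * j.toNat : ℕ) : ℤ) = x * j := by push_cast; rw [e1, e2]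
      have e4 : (x * j).toNat = x.toNat * j.toNat := by omega
      rw [e4, Om_mul (by omega) (by omega)]
    refine ⟨by rw [Array.size_setIfInBounds]; exact hlv,
            by rw [Array.size_setIfInBounds]; exact hlp, ?_, ?_⟩
    · intro m hm0' hm1'
      rw [getD_setIfInBounds vp.1 (x * j).toNat m.toNat true false (by omega)]
      rw [coveredIn_succ hj2]
      by_cases hme : m = x * j
      · rw [if_pos (by omega)]
        simp only [true_iff]
        exact Or.inr hme
      · rw [if_neg (by omega), hvis m hm0' hm1']
        constructor
        · exact Or.inl
        · rintro (hh | hh)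
          · exact hh
          · exact absurd hh hme
    · intro m hm0' hm1'
      rw [getD_setIfInBounds vp.2 (x * j).toNat m.toNat _ 1 (by omega)]
      by_cases hme : m = x * j
      · rw [if_pos (by omega)]
        constructor
        · intro _
          rw [hpx, hpj, hme, hOm]
        · intro hcc
          exact absurd ((coveredIn_succ hj2).mpr (Or.inr hme)) hcc
      · rw [if_neg (by omega)]
        obtain ⟨ha, hb⟩ := hpr m hm0' hm1'
        constructor
        · intro hcc
          rcases (coveredIn_succ hj2).mp hcc with hcc' | hcc'
          · exact ha hcc'
          · exact absurd hcc' hme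
        · intro hcc
          exact hb (fun hh => hcc ((coveredIn_succ hj2).mpr (Or.inl hh)))

theorem A_eq_S (N : Int) (hN : N ≤ 100004) : Count_PrimeNum N = S N := by
  by_cases hN1 : N ≤ 1
  · rw [Count_PrimeNum, PySem.List.pyRange_one_eq_nil (by omega)]
    rw [S_nonpos hN1]
    rfl
  · have h2N : 2 ≤ N := by omega
    rw [Count_PrimeNum]
    have H := foldl_pyRange_inv
      (f := fun (st : Int × Array Bool × Array Int) i =>
        let ans := st.1 + st.2.2.getD i.toNat 1
        let k := min (PySem.Int.floordiv N i) i
        let inner := (PySem.List.pyRange 2 (k + 1) 1).foldl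
          (fun (st2 : Array Bool × Array Int) j =>
            if st2.1.getD (i * j).toNat false = true then st2
            else (st2.1.setIfInBounds (i * j).toNat true,
                  st2.2.setIfInBounds (i * j).toNat
                    (st2.2.getD i.toNat 1 + st2.2.getD j.toNat 1)))
          st.2
        (ans, inner))
      (P := fun x st => InvC (Covered N (x - 1)) st.2.1 st.2.2 ∧ st.1 = S (x - 1))
      (N + 1) (N - 1).toNat 2 (0, Array.replicate 100005 false, Array.replicate 100005 (1 : Int))
      (by omega) (by omega) ?_ ?_
    · rw [H.2]
      congr 1
      omega
    · -- initial state: nothing is marked, every entry is 1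
      have hnc : ∀ m : ℤ, ¬ Covered N (2 - 1) m := by
        rintro m ⟨d, jj, h1, h2', h3, h4, h5⟩
        omega
      refine ⟨⟨by rw [Array.size_replicate], by rw [Array.size_replicate],
        fun m hm0 hm1 => ?_, fun m hm0 hm1 => ?_⟩, by rw [S_nonpos (by omega)]⟩
      · rw [getD_replicate _ _ _ m.toNat (by omega)]
        simp only [Bool.false_eq_true, false_iff]
        exact hnc m
      · exact ⟨fun hcc => absurd hcc (hnc m), fun _ =>
          getD_replicate _ _ _ m.toNat (by omega)⟩
    · -- outer loop body preserves the invariant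
      intro x st hx1 hx2 hPx
      obtain ⟨hInv, hans⟩ := hPx
      dsimp only
      have hxN : x ≤ N := by omega
      have hpx : st.2.2.getD x.toNat 1 = Om x.toNat :=
        entry_eq_Om hInv Iff.rfl hx1 hxN le_rfl (by omega)
      have hk1 : 1 ≤ min (PySem.Int.floordiv N x) x := by
        refine le_min ?_ (by omega)
        rw [PySem.Int.le_floordiv_iff_mul_le (by omega)]
        omega
      have Hin := foldl_pyRange_inv
        (f := fun (st2 : Array Bool × Array Int) j =>
          if st2.1.getD (x * j).toNat false = true then st2
          else (st2.1.setIfInBounds (x * j).toNat true,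
                st2.2.setIfInBounds (x * j).toNat
                  (st2.2.getD x.toNat 1 + st2.2.getD j.toNat 1)))
        (P := fun j st2 => InvC (CoveredIn N x j) st2.1 st2.2)
        (min (PySem.Int.floordiv N x) x + 1)
        (min (PySem.Int.floordiv N x) x - 1).toNat 2 st.2
        (by omega) (by omega)
        (InvC_congr hInv (fun m _ _ => coveredIn_two.symm))
        (fun j st2 hj1 hj2' hInv2 => by
          dsimp only
          exact inner_step hx1 hxN hN hj1 (by omega) (by omega) st2 hInv2)
      constructor
      · exact InvC_congr Hin (fun m _ _ => by
          rw [coveredIn_top hx1 hxN]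
          constructor
          · exact fun hh => Covered_mono hh (by omega)
          · exact fun hh => Covered_mono hh (by omega))
      · rw [hans, hpx]
        have hs := S_succ (x := x) hx1
        have hxx : x + 1 - 1 = x := by ring
        rw [hxx]
        omega

-- ===== VERDICT (by name: the statement is the Claim_ definition above) =====
theorem Count_PrimeNum_spec : Claim_equal_Count_PrimeNum := by
  intro N _ hpre
  unfold Spec_Count_PrimeNum
  rw [A_eq_S N hpre, alt_eq_S N]
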